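-- pv_equiv track=rewrite | github.com/Vahid-Esmaeelzadeh/CTCI-Python | Pramp/Word_Count_Engine.py | word_count_engine1
-- ===== SOURCE A (Python) =====
-- def word_count_engine1(document: str):
--     table = {}  # (word, occurrence)
--     temp = []
--
--     maximum_occurrence = 0
--
--     for c in document:
--         if c.isalpha() or c == "'":
--             temp.append(c.lower())
--
--         if c.isspace():
--             if len(temp) != 0:
--                 table[''.join(temp)] = table.get(''.join(temp), 0) + 1
--                 maximum_occurrence = max(table[''.join(temp)], maximum_occurrence)
--                 temp = []
--
--     if len(temp) > 0:
--         table[''.join(temp)] = table.get(''.join(temp), 0) + 1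
--         maximum_occurrence = max(table[''.join(temp)], maximum_occurrence)
--
--     result = [[] for _ in range(maximum_occurrence)]
--
--     for x in table:
--         result[table[x]-1].append(x)
--
--     final_res = []
--     for i in range(len(result)-1, -1, -1):
--         for x in result[i]:
--             final_res.append([x, str(table[x])])
--
--     return final_res
-- ===== SOURCE B (Python) =====
-- def word_count_engine1(document: str):
--     # Different decomposition/algorithm: split the document into whitespace-separated
--     # chunks up front (instead of A's char-by-char state machine with a manual flush),
--     # clean each chunk in one comprehension, count into a dict, and emit by one stable
--     # sort on descending count (instead of A's per-count bucket array walked high-to-low).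
--     counts = {}
--     for chunk in document.split():
--         word = ''.join(ch.lower() for ch in chunk if ch.isalpha() or ch == "'")
--         if word:
--             counts[word] = counts.get(word, 0) + 1
--     ordered = sorted(counts.items(), key=lambda kv: -kv[1])
--     return [[w, str(c)] for w, c in ordered]
-- ===== Notes on version B (the rewrite author's own statement) =====
-- stated objective: alternative
-- what changed: A's char-by-char state machine (manual word buffer flushed at each whitespace and after the loop) becomes split-into-chunks-then-clean-each-chunk counting, and A's per-count bucket array (allocate maximum_occurrence lists, fill, walk high-to-low) becomes one stable sort of the dict items on descending count.
import Mathlib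
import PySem

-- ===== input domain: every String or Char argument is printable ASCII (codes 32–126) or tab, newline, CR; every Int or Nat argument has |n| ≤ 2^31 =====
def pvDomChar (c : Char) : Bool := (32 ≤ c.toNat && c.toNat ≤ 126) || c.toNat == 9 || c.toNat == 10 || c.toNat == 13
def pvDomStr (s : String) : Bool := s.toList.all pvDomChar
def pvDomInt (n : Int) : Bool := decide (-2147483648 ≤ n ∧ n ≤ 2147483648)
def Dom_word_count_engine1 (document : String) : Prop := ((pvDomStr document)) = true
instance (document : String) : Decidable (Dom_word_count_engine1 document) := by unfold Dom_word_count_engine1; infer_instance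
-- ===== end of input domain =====

-- B replaces A's char-by-char state machine (manual word buffer with a flush at each
-- whitespace and after the loop) by splitting the document into whitespace-separated
-- chunks up front and cleaning each chunk in one pass, and replaces A's per-count
-- bucket array (allocate, fill, walk high-to-low) by one stable sort of the word
-- table's items on descending count.

-- ===== PORT A =====
-- the loop state of A: (table, temp, maximum_occurrence); words are List Char (''.join(temp))
def wceStep (s : PySem.Dict (List Char) Int × List Char × Int) (c : Char) :
    PySem.Dict (List Char) Int × List Char × Int :=
  let temp := if PySem.Chars.isalpha c || c == '\'' then s.2.1 ++ [PySem.Chars.lowerChar c] else s.2.1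
  if PySem.Chars.isspace c then
    if temp ≠ [] then
      let table := s.1.insert temp (s.1.getD temp 0 + 1)
      (table, [], max (table.getD temp 0) s.2.2)
    else (s.1, temp, s.2.2)
  else (s.1, temp, s.2.2)

-- the final flush after the loop ('if len(temp) > 0: …')
def wceFlush (s : PySem.Dict (List Char) Int × List Char × Int) :
    PySem.Dict (List Char) Int × Int :=
  if s.2.1.length > 0 then
    let table := s.1.insert s.2.1 (s.1.getD s.2.1 0 + 1)
    (table, max (table.getD s.2.1 0) s.2.2)
  else (s.1, s.2.2)

-- the bucket update 'result[table[x]-1].append(x)' is ported with a Nat index: exact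
-- because 1 ≤ table[x] ≤ maximum_occurrence = len(result) on every reachable state
-- (invariant lemmas below), so Python's negative-index wrap is never reached
def word_count_engine1 (document : String) : List (List String) :=
  let p := wceFlush (document.toList.foldl wceStep (PySem.Dict.empty, [], 0))
  let table := p.1
  let result := table.keys.foldl
    (fun res x =>
      res.set (table.getD x 0 - 1).toNat (res.getD (table.getD x 0 - 1).toNat [] ++ [x]))
    (List.replicate p.2.toNat [])
  (PySem.List.pyRange ((result.length : Int) - 1) (-1) (-1)).foldl
    (fun acc i =>
      (PySem.List.pyGetD result i []).foldl
        (fun acc x => acc ++ [[String.ofList x, PySem.Int.toStr (table.getD x 0)]]) acc) []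

-- ===== PORT B =====
def word_count_engine1_alt (document : String) : List (List String) :=
  let counts := (PySem.Chars.split₀ document.toList).foldl
    (fun d chunk =>
      let word := (chunk.filter (fun ch => PySem.Chars.isalpha ch || ch == '\'')).map
        PySem.Chars.lowerChar
      if word ≠ [] then d.insert word (d.getD word 0 + 1) else d)
    PySem.Dict.empty
  let ordered := PySem.List.sorted counts.items (fun kv => -kv.2) false
  ordered.map (fun kv => [String.ofList kv.1, PySem.Int.toStr kv.2])

-- ===== PRECONDITION & SPEC =====
def Spec_word_count_engine1 (document : String) (out : List (List String)) : Prop := out = word_count_engine1_alt document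
instance (document : String) (out : List (List String)) : Decidable (Spec_word_count_engine1 document out) := by unfold Spec_word_count_engine1; infer_instance

-- ===== CLAIM (what is proved, stated in full; the proofs are below) =====
def Claim_equal_word_count_engine1 : Prop := ∀ (document : String), Dom_word_count_engine1 document → Spec_word_count_engine1 document (word_count_engine1 document)

-- ===== LEMMAS AND PROOFS =====

-- ---- common vocabulary for the two tokenizations ----
def wceKeep (c : Char) : Bool := PySem.Chars.isalpha c || c == '\''
def wceProc (chunk : List Char) : List Char := (chunk.filter wceKeep).map PySem.Chars.lowerChar
def wceBump (d : PySem.Dict (List Char) Int) (w : List Char) : PySem.Dict (List Char) Int :=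
  d.insert w (d.getD w 0 + 1)

-- the word stream of A's state machine, starting from a pending processed buffer
def wceToks : List Char → List Char → List (List Char)
  | [], temp => if temp = [] then [] else [temp]
  | c :: cs, temp =>
      let temp' := if wceKeep c then temp ++ [PySem.Chars.lowerChar c] else temp
      if PySem.Chars.isspace c then
        if temp' ≠ [] then temp' :: wceToks cs [] else wceToks cs temp'
      else wceToks cs temp'

-- the word stream of B: chunks, cleaned, empties dropped
def wceWords (l : List (List Char)) : List (List Char) :=
  l.filterMap (fun ch => if wceProc ch = [] then none else some (wceProc ch))

lemma wceKeep_not_space {c : Char} (h : wceKeep c = true) : PySem.Chars.isspace c = false := by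
  unfold wceKeep PySem.Chars.isalpha PySem.Chars.isupper PySem.Chars.islower at h
  unfold PySem.Chars.isspace
  rw [Bool.eq_false_iff]
  simp only [ne_eq, Bool.or_eq_true, Bool.and_eq_true, decide_eq_true_eq, beq_iff_eq,
    Char.le_def, UInt32.le_iff_toNat_le, Char.toNat] at h ⊢
  have hA : ('A' : Char).val.toNat = 65 := by decide
  have hZ : ('Z' : Char).val.toNat = 90 := by decide
  have ha : ('a' : Char).val.toNat = 97 := by decide
  have hz : ('z' : Char).val.toNat = 122 := by decide
  have h39 : c = '\'' → c.val.toNat = 39 := by intro hc; subst hc; decide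
  rw [hA, hZ, ha, hz] at h
  rcases h with (⟨h1, h2⟩ | ⟨h1, h2⟩) | h
  · omega
  · omega
  · have := h39 h; omega

-- one-step equations, used instead of 'unfold' (which would also unfold the recursive call)
lemma wceToks_nil (temp : List Char) :
    wceToks [] temp = if temp = [] then [] else [temp] := rfl

lemma wceToks_cons (c : Char) (cs temp : List Char) :
    wceToks (c :: cs) temp =
      (let temp' := if wceKeep c then temp ++ [PySem.Chars.lowerChar c] else temp
       if PySem.Chars.isspace c then
         if temp' ≠ [] then temp' :: wceToks cs [] else wceToks cs temp'
       else wceToks cs temp') := rfl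

lemma wceGo_nil (cur : List Char) (acc : List (List Char)) :
    PySem.Chars.split₀.go [] cur acc
      = if cur.isEmpty then acc.reverse else (cur.reverse :: acc).reverse := rfl

lemma wceGo_cons (c : Char) (rest cur : List Char) (acc : List (List Char)) :
    PySem.Chars.split₀.go (c :: rest) cur acc
      = if PySem.Chars.isspace c then
          if cur.isEmpty then PySem.Chars.split₀.go rest [] acc
          else PySem.Chars.split₀.go rest [] (cur.reverse :: acc)
        else PySem.Chars.split₀.go rest (c :: cur) acc := rfl

-- A's loop + flush counts exactly the words of wceToks
lemma wceA_toks (cs : List Char) : ∀ (t : PySem.Dict (List Char) Int) (temp : List Char) (m : Int),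
    (wceFlush (cs.foldl wceStep (t, temp, m))).1 = (wceToks cs temp).foldl wceBump t := by
  induction cs with
  | nil =>
      intro t temp m
      rw [wceToks_nil]
      unfold wceFlush
      by_cases h : temp = []
      · simp [h]
      · have : temp.length > 0 := List.length_pos_iff.2 h
        simp [h, this, wceBump]
  | cons c cs ih =>
      intro t temp m
      simp only [List.foldl_cons]
      rw [wceToks_cons]
      by_cases hs : PySem.Chars.isspace c
      · have hk : wceKeep c = false := by
          by_contra hkk
          rw [wceKeep_not_space (by simpa using hkk)] at hs; exact absurd hs (by simp)
        have hk' : (PySem.Chars.isalpha c || c == '\'') = false := by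
          unfold wceKeep at hk; exact hk
        by_cases he : temp = []
        · have hstep : wceStep (t, temp, m) c = (t, temp, m) := by
            unfold wceStep; simp [hs, hk', he]
          rw [hstep, ih]
          simp [hk, hs, he]
        · have hstep : wceStep (t, temp, m) c
              = (t.insert temp (t.getD temp 0 + 1), [],
                 max ((t.insert temp (t.getD temp 0 + 1)).getD temp 0) m) := by
            unfold wceStep; simp [hs, hk', he]
          rw [hstep, ih]
          simp [hk, hs, he, wceBump]
      · have hstep : wceStep (t, temp, m) c
            = (t, (if PySem.Chars.isalpha c || c == '\'' then temp ++ [PySem.Chars.lowerChar c] else temp), m) := by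
          unfold wceStep; simp [hs]
        rw [hstep, ih]
        by_cases hk : wceKeep c
        · have hk' : (PySem.Chars.isalpha c || c == '\'') = true := by
            unfold wceKeep at hk; exact hk
          simp [hk, hk', hs]
        · have hk' : (PySem.Chars.isalpha c || c == '\'') = false := by
            unfold wceKeep at hk; simpa using hk
          simp [hk, hk', hs]

lemma wceWords_append (l1 l2 : List (List Char)) :
    wceWords (l1 ++ l2) = wceWords l1 ++ wceWords l2 := by
  unfold wceWords; rw [List.filterMap_append]

lemma wceWords_single (ch : List Char) :
    wceWords [ch] = if wceProc ch = [] then [] else [wceProc ch] := by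
  unfold wceWords
  by_cases hp : wceProc ch = [] <;> simp [hp]

-- split₀.go's output, cleaned, is wceToks on the untouched suffix
lemma wceGo_words (cs : List Char) : ∀ (r : List Char) (acc : List (List Char)),
    wceWords (PySem.Chars.split₀.go cs r acc)
      = wceWords acc.reverse ++ wceToks cs (wceProc r.reverse) := by
  induction cs with
  | nil =>
      intro r acc
      rw [wceGo_nil, wceToks_nil]
      by_cases h : r = []
      · subst h
        simp only [List.isEmpty_nil, if_true]
        have hpe : wceProc (([] : List Char).reverse) = [] := rfl
        rw [hpe]
        simp
      · have hne : r.isEmpty = false := by simpa using h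
        rw [hne]
        simp only [Bool.false_eq_true, if_false, List.reverse_cons]
        rw [wceWords_append, wceWords_single]
  | cons c cs ih =>
      intro r acc
      rw [wceGo_cons, wceToks_cons]
      by_cases hs : PySem.Chars.isspace c
      · have hk : wceKeep c = false := by
          by_contra hkk
          rw [wceKeep_not_space (by simpa using hkk)] at hs; exact absurd hs (by simp)
        by_cases he : r = []
        · subst he
          rw [if_pos hs]
          simp only [List.isEmpty_nil, if_true]
          rw [ih [] acc]
          have hpe : wceProc (([] : List Char).reverse) = [] := rfl
          rw [hpe]
          simp [hk, hs]
        · have hne : r.isEmpty = false := by simpa using he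
          rw [if_pos hs, hne]
          simp only [Bool.false_eq_true, if_false]
          rw [ih [] (r.reverse :: acc)]
          rw [show ((r.reverse :: acc).reverse : List (List Char))
                = acc.reverse ++ [r.reverse] by simp]
          rw [wceWords_append, wceWords_single]
          have hpe : wceProc (([] : List Char).reverse) = [] := rfl
          rw [hpe]
          by_cases hp : wceProc r.reverse = []
          · simp [hp, hk, hs]
          · simp [hp, hk, hs]
      · rw [if_neg hs, ih (c :: r) acc]
        have hproc : wceProc ((c :: r).reverse) = wceProc r.reverse ++
            (if wceKeep c then [PySem.Chars.lowerChar c] else []) := by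
          unfold wceProc
          rw [List.reverse_cons, List.filter_append, List.map_append]
          by_cases hk : wceKeep c <;> simp [hk]
        rw [hproc]
        by_cases hk : wceKeep c <;> simp [hk, hs]

-- B's counting fold over chunks is the bump fold over the cleaned word stream
lemma wceB_fold (l : List (List Char)) : ∀ (d : PySem.Dict (List Char) Int),
    l.foldl (fun d chunk =>
        let word := (chunk.filter (fun ch => PySem.Chars.isalpha ch || ch == '\'')).map
          PySem.Chars.lowerChar
        if word ≠ [] then d.insert word (d.getD word 0 + 1) else d) d
      = (wceWords l).foldl wceBump d := by
  induction l with
  | nil => intro d; rfl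
  | cons ch l ih =>
      intro d
      simp only [List.foldl_cons]
      rw [show wceWords (ch :: l) = wceWords [ch] ++ wceWords l from wceWords_append [ch] l]
      rw [wceWords_single]
      have hword : List.map PySem.Chars.lowerChar
          (List.filter (fun ch => PySem.Chars.isalpha ch || ch == '\'') ch) = wceProc ch := rfl
      rw [hword]
      by_cases hp : wceProc ch = []
      · rw [if_neg (by simp [hp]), if_pos hp, List.nil_append]
        exact ih d
      · rw [if_pos hp, if_neg hp, List.singleton_append, List.foldl_cons]
        exact ih _

-- the two tables coincide
lemma wce_tables (document : String) :
    (PySem.Chars.split₀ document.toList).foldl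
      (fun d chunk =>
        let word := (chunk.filter (fun ch => PySem.Chars.isalpha ch || ch == '\'')).map
          PySem.Chars.lowerChar
        if word ≠ [] then d.insert word (d.getD word 0 + 1) else d)
      PySem.Dict.empty
    = (wceFlush (document.toList.foldl wceStep (PySem.Dict.empty, [], 0))).1 := by
  rw [wceB_fold, PySem.Chars.split₀, wceGo_words, wceA_toks]
  rfl

-- invariant of A's counting state: distinct keys, every count in [1, maximum_occurrence]
def tmInv (t : PySem.Dict (List Char) Int) (m : Int) : Prop :=
  t.keys.Nodup ∧ 0 ≤ m ∧ ∀ kv ∈ t.items, 1 ≤ kv.2 ∧ kv.2 ≤ m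

lemma getD_nonneg_of_inv {t : PySem.Dict (List Char) Int} {m : Int}
    (h : tmInv t m) (w : List Char) : 0 ≤ t.getD w 0 := by
  rw [PySem.Dict.getD_eq_get?_getD]
  cases hg : t.get? w with
  | none => simp
  | some v =>
      have := h.2.2 (w, v) (PySem.Dict.mem_items_of_get?_eq_some _ hg)
      simpa using by omega

lemma bump_inv {t : PySem.Dict (List Char) Int} {m : Int} (h : tmInv t m) (w : List Char) :
    tmInv (t.insert w (t.getD w 0 + 1)) (max ((t.insert w (t.getD w 0 + 1)).getD w 0) m) := by
  have h0 := getD_nonneg_of_inv h w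
  rw [PySem.Dict.getD_insert_self]
  refine ⟨PySem.Dict.nodup_keys_insert _ _ _ h.1, by omega, ?_⟩
  intro kv hkv
  rcases (PySem.Dict.mem_items_insert ..).1 hkv with heq | ⟨hmem, _⟩
  · subst heq; simp; omega
  · have := h.2.2 kv hmem; omega

lemma wceStep_inv {s : PySem.Dict (List Char) Int × List Char × Int}
    (h : tmInv s.1 s.2.2) (c : Char) : tmInv (wceStep s c).1 (wceStep s c).2.2 := by
  unfold wceStep
  dsimp only
  split <;> (try split) <;> (try split) <;> first | exact bump_inv h _ | exact h

lemma wceTable_inv (document : String) :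
    tmInv (wceFlush (document.toList.foldl wceStep (PySem.Dict.empty, [], 0))).1
      (wceFlush (document.toList.foldl wceStep (PySem.Dict.empty, [], 0))).2 := by
  have hfold : ∀ (l : List Char) (s), tmInv s.1 s.2.2 → tmInv (l.foldl wceStep s).1 (l.foldl wceStep s).2.2 := by
    intro l
    induction l with
    | nil => intro s h; exact h
    | cons c cs ih => intro s h; exact ih _ (wceStep_inv h c)
  have h0 : tmInv (PySem.Dict.empty : PySem.Dict (List Char) Int) 0 := by
    refine ⟨by simp [PySem.Dict.keys_empty], le_refl 0, ?_⟩
    intro kv hkv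
    simp [PySem.Dict.empty] at hkv
  have h := hfold document.toList (PySem.Dict.empty, [], 0) h0
  unfold wceFlush
  split
  · exact bump_inv h _
  · exact h

-- the stable insertion sort, on a list whose keys all lie in a strictly increasing ks,
-- is the concatenation of the per-key filters in ks order
lemma insertBy_append_left {α : Type} (before : α → α → Bool) (x : α) (as bs : List α)
    (h : ∀ y ∈ as, before x y = false) :
    PySem.List.insertBy before x (as ++ bs) = as ++ PySem.List.insertBy before x bs := by
  induction as with
  | nil => rfl
  | cons a as ih =>
      have ha : before x a = false := h a (by simp)
      simp [PySem.List.insertBy, ha, ih (fun y hy => h y (by simp [hy]))]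

lemma insertBy_all_before {α : Type} (before : α → α → Bool) (x : α) (bs : List α)
    (h : ∀ y ∈ bs, before x y = true) :
    PySem.List.insertBy before x bs = x :: bs := by
  cases bs with
  | nil => rfl
  | cons b bs => simp [PySem.List.insertBy, h b (by simp)]

lemma insertBy_flatMap {α : Type} (key : α → Int) (x : α) (ks : List Int) (f : Int → List α)
    (hks : ks.Pairwise (· < ·)) (hx : key x ∈ ks)
    (hf : ∀ k ∈ ks, ∀ y ∈ f k, key y = k) :
    PySem.List.insertBy (fun a b => decide (key a < key b)) x (ks.flatMap f)
      = ks.flatMap (fun k => if k = key x then f k ++ [x] else f k) := by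
  induction ks with
  | nil => simp at hx
  | cons k rest ih =>
      rw [List.pairwise_cons] at hks
      simp only [List.flatMap_cons]
      by_cases hk : k = key x
      · have h1 : ∀ y ∈ f k, (fun a b => decide (key a < key b)) x y = false := by
          intro y hy
          have := hf k (by simp) y hy
          simp [this, ← hk]
        rw [insertBy_append_left _ _ _ _ h1]
        have h2 : ∀ y ∈ rest.flatMap f, (fun a b => decide (key a < key b)) x y = true := by
          intro y hy
          rcases List.mem_flatMap.1 hy with ⟨j, hj, hyj⟩
          have hkey := hf j (by simp [hj]) y hyj
          have := hks.1 j hj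
          simp [hkey, ← hk, this]
        rw [insertBy_all_before _ _ _ h2]
        have h3 : rest.flatMap (fun j => if j = key x then f j ++ [x] else f j) = rest.flatMap f := by
          apply List.flatMap_congr
          intro j hj
          have : j ≠ key x := by have := hks.1 j hj; omega
          simp [this]
        rw [h3, if_pos hk]
        simp
      · have hxr : key x ∈ rest := by cases hx with
          | head => exact absurd rfl hk
          | tail _ h => exact h
        have h1 : ∀ y ∈ f k, (fun a b => decide (key a < key b)) x y = false := by
          intro y hy
          have hkey := hf k (by simp) y hy
          have := hks.1 _ hxr
          simp [hkey]; omega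
        rw [insertBy_append_left _ _ _ _ h1, if_neg hk,
          ih hks.2 hxr (fun j hj y hy => hf j (by simp [hj]) y hy)]

lemma sorted_eq_flatMap_filter {α : Type} (key : α → Int) (l : List α) (ks : List Int)
    (hks : ks.Pairwise (· < ·)) (hmem : ∀ x ∈ l, key x ∈ ks) :
    PySem.List.sorted l key false
      = ks.flatMap (fun k => l.filter (fun x => key x == k)) := by
  rw [PySem.List.sorted_eq_foldl_insertBy]
  suffices aux : ∀ (l2 p : List α), (∀ x ∈ l2, key x ∈ ks) →
      l2.foldl (fun acc x => PySem.List.insertBy (fun a b => decide (key a < key b)) x acc)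
        (ks.flatMap (fun k => p.filter (fun x => key x == k)))
      = ks.flatMap (fun k => (p ++ l2).filter (fun x => key x == k)) by
    have := aux l [] hmem
    rw [show (ks.flatMap (fun k => ([] : List α).filter (fun x => key x == k))) = [] by simp] at this
    simpa using this
  intro l2
  induction l2 with
  | nil => intro p _; simp
  | cons x xs ih =>
      intro p hm
      simp only [List.foldl_cons]
      rw [insertBy_flatMap key x ks _ hks (hm x (by simp))
        (fun k _ y hy => by have := List.mem_filter.1 hy; exact eq_of_beq this.2)]
      have hstep : (ks.flatMap fun k => if k = key x then (p.filter (fun y => key y == k)) ++ [x] else p.filter (fun y => key y == k))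
          = ks.flatMap (fun k => (p ++ [x]).filter (fun y => key y == k)) := by
        apply List.flatMap_congr
        intro k _
        rw [List.filter_append]
        by_cases hk : k = key x
        · simp [hk]
        · have : (key x == k) = false := by simp; omega
          simp [hk, this]
      rw [hstep, ih (p ++ [x]) (fun y hy => hm y (by simp [hy]))]
      simp

-- the bucket-filling fold, characterised slot by slot
lemma bucket_fold (l : List (List Char × Int)) (res : List (List (List Char)))
    (h : ∀ kv ∈ l, 1 ≤ kv.2 ∧ (kv.2 - 1).toNat < res.length) :
    (l.foldl (fun res kv =>
        res.set (kv.2 - 1).toNat (res.getD (kv.2 - 1).toNat [] ++ [kv.1])) res).length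
      = res.length ∧
    ∀ j : Nat,
      (l.foldl (fun res kv =>
        res.set (kv.2 - 1).toNat (res.getD (kv.2 - 1).toNat [] ++ [kv.1])) res).getD j []
      = res.getD j [] ++ (l.filter (fun kv => kv.2 == (j : Int) + 1)).map (·.1) := by
  induction l generalizing res with
  | nil => simp
  | cons kv tl ih =>
      have hkv := h kv (by simp)
      have hlen : (res.set (kv.2 - 1).toNat (res.getD (kv.2 - 1).toNat [] ++ [kv.1])).length = res.length := by
        simp
      have htl : ∀ p ∈ tl, 1 ≤ p.2 ∧ (p.2 - 1).toNat < (res.set (kv.2 - 1).toNat (res.getD (kv.2 - 1).toNat [] ++ [kv.1])).length := by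
        intro p hp
        rw [hlen]
        exact h p (by simp [hp])
      obtain ⟨ihlen, ihget⟩ := ih _ htl
      simp only [List.foldl_cons]
      refine ⟨by rw [ihlen, hlen], ?_⟩
      intro j
      rw [ihget j]
      by_cases hj : (kv.2 - 1).toNat = j
      · have hbeq : (kv.2 == (j : Int) + 1) = true := by
          simp only [beq_iff_eq]; omega
        have hget : (res.set (kv.2 - 1).toNat (res.getD (kv.2 - 1).toNat [] ++ [kv.1])).getD j []
            = res.getD j [] ++ [kv.1] := by
          subst hj
          have hlt := hkv.2
          revert hlt
          generalize (kv.2 - 1).toNat = i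
          intro hlt
          simp [List.getD, List.getElem?_set_self hlt]
        rw [hget, List.filter_cons, hbeq]
        simp
      · have hbeq : (kv.2 == (j : Int) + 1) = false := by
          simp only [beq_eq_false_iff_ne, ne_eq]
          intro hc; apply hj; omega
        have hget : (res.set (kv.2 - 1).toNat (res.getD (kv.2 - 1).toNat [] ++ [kv.1])).getD j []
            = res.getD j [] := by
          revert hj
          generalize (kv.2 - 1).toNat = i
          intro hj
          simp [List.getD, List.getElem?_set_ne hj]
        rw [hget, List.filter_cons_of_neg (by simp [hbeq])]

-- ===== VERDICT (by name: the statement is the Claim_ definition above) =====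
theorem word_count_engine1_spec : Claim_equal_word_count_engine1 := by
  unfold Claim_equal_word_count_engine1
  intro document _
  unfold Spec_word_count_engine1 word_count_engine1 word_count_engine1_alt
  obtain ⟨hnd, hm0, hval⟩ := wceTable_inv document
  dsimp only
  rw [wce_tables document]
  set t := (wceFlush (document.toList.foldl wceStep (PySem.Dict.empty, [], 0))).1 with ht
  set m := (wceFlush (document.toList.foldl wceStep (PySem.Dict.empty, [], 0))).2 with hmdef
  set n := m.toNat with hn
  have hnm : (n : Int) = m := Int.toNat_of_nonneg hm0
  -- the bucket-filling fold, rewritten as a fold over the items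
  have hkeys : t.keys.foldl
      (fun res x => res.set (t.getD x 0 - 1).toNat (res.getD (t.getD x 0 - 1).toNat [] ++ [x]))
      (List.replicate n []) =
      t.items.foldl (fun res kv => res.set (kv.2 - 1).toNat (res.getD (kv.2 - 1).toNat [] ++ [kv.1]))
      (List.replicate n []) := by
    simp only [PySem.Dict.keys, List.foldl_map]
    apply PySem.List.foldl_congr_mem
    intro acc kv hkv
    rw [PySem.Dict.getD_of_mem_items _ hkv hnd 0]
  rw [hkeys]
  have hrange : ∀ kv ∈ t.items, 1 ≤ kv.2 ∧ (kv.2 - 1).toNat < (List.replicate n ([] : List (List Char))).length := by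
    intro kv hkv
    have := hval kv hkv
    constructor
    · omega
    · simp only [List.length_replicate]; omega
  obtain ⟨hlen, hget⟩ := bucket_fold t.items (List.replicate n []) hrange
  set result := t.items.foldl
      (fun res kv => res.set (kv.2 - 1).toNat (res.getD (kv.2 - 1).toNat [] ++ [kv.1]))
      (List.replicate n []) with hres
  rw [List.length_replicate] at hlen
  have hbucket : ∀ j : Nat, result.getD j [] = (t.items.filter (fun kv => kv.2 == (j : Int) + 1)).map (·.1) := by
    intro j
    rw [hget j, List.getD]
    cases Nat.lt_or_ge j n with
    | inl h => simp [h]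
    | inr h =>
        have : (List.replicate n ([] : List (List Char)))[j]? = none := by
          rw [List.getElem?_eq_none_iff]; simpa using h
        simp [this]
  -- A-side: fold high-to-low over the buckets = flatMap over range
  rw [hlen]
  simp only [PySem.List.foldl_append_singleton_eq_map]
  rw [show ∀ (l : List Int) (g : Int → List (List String)),
        l.foldl (fun acc i => acc ++ g i) [] = l.flatMap g from
      fun l g => by simpa using PySem.List.foldl_append_eq_flatMap g (l := l) (acc := [])]
  rw [PySem.List.pyRange_neg_one]
  rw [show (((n : Int) - 1) - (-1)).toNat = n by omega]
  rw [List.flatMap_map]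
  -- B-side: stable sort = flatMap of the per-count filters, count descending
  have hmem : ∀ kv ∈ t.items, (fun kv : List Char × Int => -kv.2) kv ∈ PySem.List.pyRange (-m) 0 1 := by
    intro kv hkv
    have := hval kv hkv
    rw [PySem.List.mem_pyRange_one]
    dsimp only
    omega
  rw [sorted_eq_flatMap_filter (fun kv => -kv.2) t.items (PySem.List.pyRange (-m) 0 1)
      (PySem.List.pairwise_lt_pyRange_one _ _) hmem]
  rw [List.map_flatMap, PySem.List.pyRange_one]
  rw [show ((0 : Int) - (-m)).toNat = n by omega]
  rw [List.flatMap_map]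
  apply List.flatMap_congr
  intro k hk
  have hkn : k < n := List.mem_range.1 hk
  have hc : ((n : Int) - 1 - (k : Int)) = (((n - 1 - k : Nat)) : Int) := by omega
  rw [hc, PySem.List.pyGetD_natCast, hbucket (n - 1 - k), List.map_map]
  have hfil : t.items.filter (fun kv => kv.2 == ((n - 1 - k : Nat) : Int) + 1)
      = t.items.filter (fun kv => -kv.2 == -m + (k : Int)) := by
    apply List.filter_congr
    intro kv _
    rw [Bool.eq_iff_iff]
    simp only [beq_iff_eq]
    omega
  rw [hfil]
  apply List.map_congr_left
  intro kv hkv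
  have hkv' : kv ∈ t.items := List.mem_filter.1 hkv |>.1
  simp only [Function.comp]
  rw [PySem.Dict.getD_of_mem_items _ hkv' hnd 0]
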